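-- pv_equiv track=rewrite | github.com/katrine-lombardo/practice | python/naughty_or_nice.py | what_list_am_i_on
-- ===== SOURCE A (Python) =====
-- def what_list_am_i_on(actions):
--     bad_action_letters = ["b", "f", "k"]
--     good_action_letters = ["g", "s", "n"]
--     bad_actions_count = 0
--     good_actions_count = 0
--
--     for action in actions:
--         if action[0] in bad_action_letters:
--             bad_actions_count += 1
--         elif action[0] in good_action_letters:
--             good_actions_count += 1
--
--     return "nice" if good_actions_count > bad_actions_count else "naughty"
-- ===== SOURCE B (Python) =====
-- def what_list_am_i_on(actions):
--     firsts = [action[0] for action in actions]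
--     bad = sum(firsts.count(letter) for letter in "bfk")
--     good = sum(firsts.count(letter) for letter in "gsn")
--     return "nice" if good > bad else "naughty"
-- ===== Notes on version B (the rewrite author's own statement) =====
-- stated objective: idiomatic
-- what changed: Replaces the per-action branching accumulator loop with a tally-then-aggregate computation: extract all first letters once, then sum per-letter counts over the fixed bad/good letter sets.
import Mathlib
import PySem

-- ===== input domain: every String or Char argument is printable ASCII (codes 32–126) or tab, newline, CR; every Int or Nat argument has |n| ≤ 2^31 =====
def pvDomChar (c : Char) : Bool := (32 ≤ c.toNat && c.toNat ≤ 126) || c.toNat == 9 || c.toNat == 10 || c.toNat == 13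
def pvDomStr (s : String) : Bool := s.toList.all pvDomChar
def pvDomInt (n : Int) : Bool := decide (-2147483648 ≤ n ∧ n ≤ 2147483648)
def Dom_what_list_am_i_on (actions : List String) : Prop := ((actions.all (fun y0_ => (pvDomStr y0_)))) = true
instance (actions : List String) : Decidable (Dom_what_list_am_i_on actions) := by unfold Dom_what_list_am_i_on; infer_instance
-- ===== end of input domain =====

-- B replaces the per-action branching loop with extract-first-letters-then-sum-per-letter-counts (idiomatic tally/aggregate).

-- ===== PORT A =====
def what_list_am_i_on (actions : List String) : String :=
  let bad_action_letters : List Char := ['b', 'f', 'k']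
  let good_action_letters : List Char := ['g', 's', 'n']
  let p := actions.foldl (fun (acc : Int × Int) action =>
    match PySem.Str.pyGet? action 0 with
    | some c =>
        if bad_action_letters.contains c then (acc.1 + 1, acc.2)
        else if good_action_letters.contains c then (acc.1, acc.2 + 1)
        else acc
    | none => acc) (0, 0)
  if p.2 > p.1 then "nice" else "naughty"

-- ===== PORT B =====
def what_list_am_i_on_alt (actions : List String) : String :=
  let firsts := actions.map (fun action => PySem.Str.pyGet? action 0)
  let bad := (['b', 'f', 'k'].map (fun letter => PySem.List.count firsts (some letter))).sum
  let good := (['g', 's', 'n'].map (fun letter => PySem.List.count firsts (some letter))).sum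
  if good > bad then "nice" else "naughty"

-- ===== PRECONDITION & SPEC =====
-- Pre_ excludes lists containing an empty string, on which Python A raises IndexError at action[0].
def Pre_what_list_am_i_on (actions : List String) : Prop := ∀ a ∈ actions, a ≠ ""
instance (actions : List String) : Decidable (Pre_what_list_am_i_on actions) := by unfold Pre_what_list_am_i_on; infer_instance
def pvWitness_what_list_am_i_on : List String := ["bite", "give", "sing", "x"]

def Spec_what_list_am_i_on (actions : List String) (out : String) : Prop := out = what_list_am_i_on_alt actions
instance (actions : List String) (out : String) : Decidable (Spec_what_list_am_i_on actions out) := by unfold Spec_what_list_am_i_on; infer_instance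

-- ===== CLAIM (what is proved, stated in full; the proofs are below) =====
def Claim_equal_what_list_am_i_on : Prop := ∀ (actions : List String), Dom_what_list_am_i_on actions → Pre_what_list_am_i_on actions → Spec_what_list_am_i_on actions (what_list_am_i_on actions)

-- ===== LEMMAS AND PROOFS =====

-- loop invariant: A's foldl state equals the per-letter counts of the mapped first letters
lemma pvLoopA (actions : List String) (b g : Int) :
    actions.foldl (fun (acc : Int × Int) action =>
      match PySem.Str.pyGet? action 0 with
      | some c =>
          if ['b', 'f', 'k'].contains c then (acc.1 + 1, acc.2)
          else if ['g', 's', 'n'].contains c then (acc.1, acc.2 + 1)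
          else acc
      | none => acc) (b, g) =
    (b + PySem.List.count (actions.map (fun a => PySem.Str.pyGet? a 0)) (some 'b')
       + PySem.List.count (actions.map (fun a => PySem.Str.pyGet? a 0)) (some 'f')
       + PySem.List.count (actions.map (fun a => PySem.Str.pyGet? a 0)) (some 'k'),
     g + PySem.List.count (actions.map (fun a => PySem.Str.pyGet? a 0)) (some 'g')
       + PySem.List.count (actions.map (fun a => PySem.Str.pyGet? a 0)) (some 's')
       + PySem.List.count (actions.map (fun a => PySem.Str.pyGet? a 0)) (some 'n')) := by
  induction actions generalizing b g with
  | nil => simp [PySem.List.count_eq]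
  | cons a as ih =>
      simp only [List.foldl_cons, List.map_cons]
      rcases h : PySem.Str.pyGet? a 0 with _ | c
      · simp only [ih, PySem.List.count_eq, List.count_cons]
        simp
      · dsimp only
        by_cases hb : (['b', 'f', 'k'] : List Char).contains c
        · have : c = 'b' ∨ c = 'f' ∨ c = 'k' := by
            simpa [List.contains_eq_mem] using hb
          rw [if_pos hb, ih]
          simp only [PySem.List.count_eq, List.count_cons]
          rcases this with h' | h' | h' <;> subst h' <;> simp <;> ring
        · by_cases hg : (['g', 's', 'n'] : List Char).contains c
          · have : c = 'g' ∨ c = 's' ∨ c = 'n' := by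
              simpa [List.contains_eq_mem] using hg
            rw [if_neg hb, if_pos hg, ih]
            simp only [PySem.List.count_eq, List.count_cons]
            rcases this with h' | h' | h' <;> subst h' <;> simp <;> ring
          · have hc : c ≠ 'b' ∧ c ≠ 'f' ∧ c ≠ 'k' ∧ c ≠ 'g' ∧ c ≠ 's' ∧ c ≠ 'n' := by
              refine ⟨?_, ?_, ?_, ?_, ?_, ?_⟩ <;> intro h'
              · exact hb (by simp [h', List.contains_eq_mem])
              · exact hb (by simp [h', List.contains_eq_mem])
              · exact hb (by simp [h', List.contains_eq_mem])
              · exact hg (by simp [h', List.contains_eq_mem])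
              · exact hg (by simp [h', List.contains_eq_mem])
              · exact hg (by simp [h', List.contains_eq_mem])
            rw [if_neg hb, if_neg hg, ih]
            simp only [PySem.List.count_eq, List.count_cons]
            obtain ⟨h1, h2, h3, h4, h5, h6⟩ := hc
            simp [h1, h2, h3, h4, h5, h6, Ne.symm]

-- ===== VERDICT (by name: the statement is the Claim_ definition above) =====
theorem what_list_am_i_on_spec : Claim_equal_what_list_am_i_on := by
  intro actions _ _
  unfold Spec_what_list_am_i_on
  simp only [what_list_am_i_on, what_list_am_i_on_alt]
  rw [pvLoopA]
  simp only [List.map_cons, List.map_nil, List.sum_cons, List.sum_nil]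
  split_ifs with h1 h2 h2 <;> first
    | rfl
    | (exfalso; omega)
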